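-- pv_equiv track=rewrite | github.com/Kris465/MemoryBox | RPO/block11/task168.py | insert_between_same_sign
-- ===== SOURCE A (Python) =====
-- def insert_between_same_sign(arr, n):
--     i = 1
--     while i < len(arr):
--         if (arr[i-1] * arr[i] > 0):
--             arr.insert(i, n)
--             i += 1
--         i += 1
--     return arr
-- ===== SOURCE B (Python) =====
-- def insert_between_same_sign(arr, n):
--     out = []
--     prev = None
--     for x in arr:
--         if prev is not None and prev * x > 0:
--             out.append(n)
--         out.append(x)
--         prev = x
--     arr[:] = out
--     return arr
-- ===== Notes on version B (the rewrite author's own statement) =====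
-- stated objective: faster
-- what changed: B replaces A's while-loop that inserts into the list it is indexing (each insert shifting the tail, with manual index skips) by a single forward pass that rebuilds the result from the previous element and writes it back in place via arr[:] = out.
import Mathlib
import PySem

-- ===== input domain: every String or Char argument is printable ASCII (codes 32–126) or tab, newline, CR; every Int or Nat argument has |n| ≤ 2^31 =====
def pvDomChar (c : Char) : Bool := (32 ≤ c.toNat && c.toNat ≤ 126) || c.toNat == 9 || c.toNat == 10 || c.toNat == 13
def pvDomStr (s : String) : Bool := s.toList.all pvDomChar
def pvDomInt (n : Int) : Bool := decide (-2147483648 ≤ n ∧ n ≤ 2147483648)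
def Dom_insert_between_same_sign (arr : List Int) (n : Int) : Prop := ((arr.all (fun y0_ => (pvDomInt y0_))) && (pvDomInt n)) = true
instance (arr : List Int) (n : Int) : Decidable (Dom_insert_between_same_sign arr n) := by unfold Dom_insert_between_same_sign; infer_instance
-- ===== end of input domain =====

-- B rebuilds the result in one forward pass over the original elements instead of
-- A's in-place while-loop that inserts into the list it is indexing; return values are
-- proved equal (both Pythons mutate arr in place and return it; B via arr[:] = out).


-- ===== PORT A =====
-- A's while loop: index i over the (mutating) list, insert at i and skip two on a
-- same-sign pair, else advance one.
def pvALoop (n : Int) (arr : List Int) (i : Nat) : List Int :=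
  if _h : i < arr.length then
    if ((PySem.List.pyGet? arr ((i : Int) - 1)).getD 0) *
       ((PySem.List.pyGet? arr (i : Int)).getD 0) > 0 then
      pvALoop n (PySem.List.insert arr (i : Int) n) (i + 2)
    else
      pvALoop n arr (i + 1)
  else arr
termination_by arr.length - i
decreasing_by
  · have h := PySem.List.length_insert arr (i : Int) n
    omega
  · omega

def insert_between_same_sign (arr : List Int) (n : Int) : List Int :=
  pvALoop n arr 1

-- ===== PORT B =====
-- B's loop body: state = (out, prev); append n before x when prev and x share a sign.
def pvBStep (n : Int) (st : List Int × Option Int) (x : Int) : List Int × Option Int :=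
  ((if (match st.2 with | some p => decide (p * x > 0) | none => false) then
      st.1 ++ [n, x]
    else
      st.1 ++ [x]), some x)

def insert_between_same_sign_alt (arr : List Int) (n : Int) : List Int :=
  (arr.foldl (pvBStep n) ([], none)).1

-- ===== PRECONDITION & SPEC =====
def Spec_insert_between_same_sign (arr : List Int) (n : Int) (out : List Int) : Prop := out = insert_between_same_sign_alt arr n
instance (arr : List Int) (n : Int) (out : List Int) : Decidable (Spec_insert_between_same_sign arr n out) := by unfold Spec_insert_between_same_sign; infer_instance

-- ===== CLAIM (what is proved, stated in full; the proofs are below) =====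
def Claim_equal_insert_between_same_sign : Prop := ∀ (arr : List Int) (n : Int), Dom_insert_between_same_sign arr n → Spec_insert_between_same_sign arr n (insert_between_same_sign arr n)

-- ===== LEMMAS AND PROOFS =====

-- reference shape of the result: elements still to process, given the previous element a
def pvCore (n a : Int) : List Int → List Int
  | [] => []
  | x :: xs => (if a * x > 0 then [n, x] else [x]) ++ pvCore n x xs

theorem pvALoop_core (n : Int) : ∀ (rest done : List Int) (a : Int),
    done ≠ [] → done.getLast? = some a →
    pvALoop n (done ++ rest) done.length = done ++ pvCore n a rest := by
  intro rest
  induction rest with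
  | nil =>
    intro done a _ _
    unfold pvALoop
    simp [pvCore]
  | cons x xs ih =>
    intro done a hne hlast
    have hdpos : 0 < done.length := List.length_pos_iff.mpr hne
    have hi : done.length < (done ++ x :: xs).length := by simp
    have hgx : PySem.List.pyGet? (done ++ x :: xs) ((done.length : Int)) = some x := by
      rw [PySem.List.pyGet?_natCast]
      simp
    have hga : PySem.List.pyGet? (done ++ x :: xs) ((done.length : Int) - 1) = some a := by
      have : ((done.length : Int) - 1) = ((done.length - 1 : Nat) : Int) := by omega
      rw [this, PySem.List.pyGet?_natCast]
      rw [List.getElem?_append_left (by omega)]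
      rw [← List.getLast?_eq_getElem?] at *
      exact hlast
    unfold pvALoop
    rw [dif_pos hi, hgx, hga]
    simp only [Option.getD_some]
    by_cases hsign : a * x > 0
    · rw [if_pos hsign]
      have hins : PySem.List.insert (done ++ x :: xs) ((done.length : Int)) n
          = (done ++ [n, x]) ++ xs := by
        rw [PySem.List.insert_natCast _ _ _ (by simp)]
        simp
      rw [hins]
      have hlen2 : done.length + 2 = (done ++ [n, x]).length := by simp
      rw [hlen2, ih (done ++ [n, x]) x (by simp) (by simp)]
      simp [pvCore, hsign]
    · rw [if_neg hsign]
      have hassoc : done ++ x :: xs = (done ++ [x]) ++ xs := by simp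
      have hlen1 : done.length + 1 = (done ++ [x]).length := by simp
      rw [hassoc, hlen1, ih (done ++ [x]) x (by simp) (by simp)]
      simp [pvCore, hsign]

theorem pvB_core (n : Int) : ∀ (rest out : List Int) (a : Int),
    (rest.foldl (pvBStep n) (out, some a)).1 = out ++ pvCore n a rest := by
  intro rest
  induction rest with
  | nil => intro out a; simp [pvCore]
  | cons x xs ih =>
    intro out a
    simp only [List.foldl_cons, pvBStep]
    by_cases hsign : a * x > 0
    · simp [hsign, ih, pvCore]
    · simp [hsign, ih, pvCore]

-- ===== VERDICT (by name: the statement is the Claim_ definition above) =====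
theorem insert_between_same_sign_spec : Claim_equal_insert_between_same_sign := by
  intro arr n _
  unfold Spec_insert_between_same_sign insert_between_same_sign insert_between_same_sign_alt
  cases arr with
  | nil =>
    unfold pvALoop
    simp
  | cons a rest =>
    have hA : pvALoop n ([a] ++ rest) ([a] : List Int).length = [a] ++ pvCore n a rest :=
      pvALoop_core n rest [a] a (by simp) (by simp)
    simp only [List.length_cons, List.length_nil, List.singleton_append] at hA
    rw [hA]
    simp only [List.foldl_cons]
    have hstep : pvBStep n ([], none) a = ([a], some a) := by simp [pvBStep]
    rw [hstep, pvB_core]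
    simp
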